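-- pv_equiv track=rewrite | github.com/Creidhne86/Advent_2023 | 2023/d7p1.py | is_two_pairs
-- ===== SOURCE A (Python) =====
-- def is_two_pairs(hand):
--     pairs = 0
--     wildcards = hand.count('J')
--     used_wildcard = False
--     for card in set(hand):
--         if card != 'J':
--             count = hand.count(card)
--             if count + wildcards >= 2:
--                 pairs += 1
--                 if count == 1 and wildcards > 0 and not used_wildcard:
--                     used_wildcard = True
--                     wildcards -= 1
--             if pairs == 2:
--                 return True
--     return False
-- ===== SOURCE B (Python) =====
-- def is_two_pairs(hand):
--     counts = {}
--     for card in hand: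
--         counts[card] = counts.get(card, 0) + 1
--     w = counts.get('J', 0)
--     n1 = sum(1 for c, v in counts.items() if c != 'J' and v == 1)
--     n2 = sum(1 for c, v in counts.items() if c != 'J' and v >= 2)
--     pairs = n2 + (0 if w == 0 else min(n1, 1) if w == 1 else n1)
--     return pairs >= 2
-- ===== Notes on version B (the rewrite author's own statement) =====
-- stated objective: simpler
-- what changed: Replaces the stateful set-iteration with a used_wildcard flag and repeated hand.count scans by building a counter once and computing the pair count in closed form from n2 (cards with count>=2), n1 (cards with count==1) and the joker count w: pairs = n2 + (0 if w==0 else min(n1,1) if w==1 else n1).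
import Mathlib
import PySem

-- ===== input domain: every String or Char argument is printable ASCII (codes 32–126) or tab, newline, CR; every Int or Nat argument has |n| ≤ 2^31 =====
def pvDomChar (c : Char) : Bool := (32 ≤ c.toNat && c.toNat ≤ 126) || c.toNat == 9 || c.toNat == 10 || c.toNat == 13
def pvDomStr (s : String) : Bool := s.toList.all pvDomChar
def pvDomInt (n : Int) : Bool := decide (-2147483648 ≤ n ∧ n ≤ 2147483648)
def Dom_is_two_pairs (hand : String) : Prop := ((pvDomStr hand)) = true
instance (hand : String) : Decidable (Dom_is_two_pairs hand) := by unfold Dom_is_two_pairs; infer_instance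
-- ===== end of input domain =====

-- B replaces A's stateful set-iteration (used_wildcard flag, repeated hand.count scans) by a
-- counter built once plus a closed-form pair count from n1/n2/joker count; objective: simpler.

-- ===== PORT A =====
-- The loop over set(hand); Python's set iteration order is unspecified, ported in
-- first-occurrence order (the result is order-independent, as the equivalence proof shows).
-- hand.count(card) for a single character is ported exactly as List.count on the characters.
def isTwoPairsLoopA (hand : List Char) : List Char → Int → Int → Bool → Bool
  | [], _, _, _ => false
  | card :: rest, pairs, wildcards, used_wildcard =>
    if card ≠ 'J' then
      let count : Int := (hand.count card : Int)
      if count + wildcards ≥ 2 then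
        let pairs := pairs + 1
        if count = 1 ∧ wildcards > 0 ∧ used_wildcard = false then
          if pairs = 2 then true
          else isTwoPairsLoopA hand rest pairs (wildcards - 1) true
        else
          if pairs = 2 then true
          else isTwoPairsLoopA hand rest pairs wildcards used_wildcard
      else
        if pairs = 2 then true
        else isTwoPairsLoopA hand rest pairs wildcards used_wildcard
    else
      isTwoPairsLoopA hand rest pairs wildcards used_wildcard

def is_two_pairs (hand : String) : Bool :=
  isTwoPairsLoopA hand.toList (PySem.Set.ofList hand.toList) 0 (hand.toList.count 'J' : Int) false

-- ===== PORT B =====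
def is_two_pairs_alt (hand : String) : Bool :=
  let counts : PySem.Dict Char Int :=
    hand.toList.foldl (fun d card => d.insert card (d.getD card 0 + 1)) PySem.Dict.empty
  let w : Int := counts.getD 'J' 0
  let n1 : Int := (counts.items.map (fun p => if p.1 ≠ 'J' ∧ p.2 = 1 then (1 : Int) else 0)).sum
  let n2 : Int := (counts.items.map (fun p => if p.1 ≠ 'J' ∧ p.2 ≥ 2 then (1 : Int) else 0)).sum
  let pairs : Int := n2 + (if w = 0 then 0 else if w = 1 then min n1 1 else n1)
  decide (pairs ≥ 2)

-- ===== PRECONDITION & SPEC =====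
def Spec_is_two_pairs (hand : String) (out : Bool) : Prop := out = is_two_pairs_alt hand
instance (hand : String) (out : Bool) : Decidable (Spec_is_two_pairs hand out) := by unfold Spec_is_two_pairs; infer_instance

-- ===== CLAIM (what is proved, stated in full; the proofs are below) =====
def Claim_equal_is_two_pairs : Prop := ∀ (hand : String), Dom_is_two_pairs hand → Spec_is_two_pairs hand (is_two_pairs hand)

-- ===== LEMMAS AND PROOFS =====

-- number of cards in l that are not 'J' and occur exactly once / at least twice in hand
def pvN1 (hand l : List Char) : Nat := l.countP (fun c => c ≠ 'J' ∧ hand.count c = 1)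
def pvN2 (hand l : List Char) : Nat := l.countP (fun c => c ≠ 'J' ∧ 2 ≤ hand.count c)

-- extra pairs the remaining wildcards contribute, given the used_wildcard flag
def pvBonus (n1 w : Int) (u : Bool) : Int :=
  if u then (if 1 ≤ w then n1 else 0)
  else (if w = 0 then 0 else if w = 1 then min n1 1 else n1)

lemma loopA_eq (hand : List Char) (l : List Char)
    (hl : ∀ c ∈ l, c ≠ 'J' → 1 ≤ hand.count c)
    (p w : Int) (u : Bool) (hp : p = 0 ∨ p = 1) (hw : 0 ≤ w) :
    isTwoPairsLoopA hand l p w u =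
      decide (2 ≤ p + (pvN2 hand l : Int) + pvBonus (pvN1 hand l) w u) := by
  induction l generalizing p w u with
  | nil =>
      simp [isTwoPairsLoopA, pvN1, pvN2, pvBonus]
      omega
  | cons c r ih =>
      have hlr : ∀ x ∈ r, x ≠ 'J' → 1 ≤ hand.count x := fun x hx => hl x (List.mem_cons_of_mem _ hx)
      by_cases hc : c = 'J'
      · subst hc
        simp only [isTwoPairsLoopA, ne_eq, not_true_eq_false, if_false]
        rw [ih hlr p w u hp hw]
        simp [pvN1, pvN2]
      · have hcnt : 1 ≤ hand.count c := hl c (List.mem_cons_self) hc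
        have hn1 : pvN1 hand (c :: r) =
            (if hand.count c = 1 then 1 else 0) + pvN1 hand r := by
          simp [pvN1, List.countP_cons, hc]; split_ifs <;> simp_all <;> omega
        have hn2 : pvN2 hand (c :: r) =
            (if 2 ≤ hand.count c then 1 else 0) + pvN2 hand r := by
          simp [pvN2, List.countP_cons, hc]; split_ifs <;> simp_all <;> omega
        simp only [isTwoPairsLoopA, ne_eq, hc, not_false_eq_true, if_true]
        by_cases h2 : 2 ≤ hand.count c
        · -- count ≥ 2: always a pair, wildcard untouched
          have hcond : ((hand.count c : Int)) + w ≥ 2 := by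
            have : (2 : Int) ≤ (hand.count c : Int) := by exact_mod_cast h2
            omega
          have hne1 : ¬ ((hand.count c : Int) = 1 ∧ w > 0 ∧ u = false) := by
            rintro ⟨h1, -, -⟩
            have : hand.count c = 1 := by exact_mod_cast h1
            omega
          have hne2 : ¬ hand.count c = 1 := by omega
          rw [if_pos hcond, if_neg hne1, hn1, hn2, if_neg hne2, if_pos h2]
          rcases hp with hp | hp
          · subst hp
            rw [if_neg (by norm_num), show (0:Int) + 1 = 1 from by norm_num,
                ih hlr 1 w u (Or.inr rfl) hw, decide_eq_decide]
            simp only [pvBonus]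
            split_ifs <;> (try contradiction) <;> push_cast <;> omega
          · subst hp
            rw [if_pos (by norm_num)]
            symm; rw [decide_eq_true_iff]
            simp only [pvBonus]
            split_ifs <;> (try contradiction) <;> push_cast <;> omega
        · -- count = 1: a pair only with a wildcard
          have hcnt1 : hand.count c = 1 := by omega
          have hcint : (hand.count c : Int) = 1 := by exact_mod_cast hcnt1
          rw [hn1, hn2, if_pos hcnt1, if_neg h2]
          by_cases hwge : 1 ≤ w
          · have hcond : ((hand.count c : Int)) + w ≥ 2 := by omega
            rw [if_pos hcond]
            by_cases hu : u = false
            · subst hu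
              rw [if_pos ⟨hcint, by omega, rfl⟩]
              rcases hp with hp | hp
              · subst hp
                rw [if_neg (by norm_num), show (0:Int) + 1 = 1 from by norm_num,
                    ih hlr 1 (w - 1) true (Or.inr rfl) (by omega), decide_eq_decide]
                simp only [pvBonus]
                split_ifs <;> (try contradiction) <;> push_cast <;> omega
              · subst hp
                rw [if_pos (by norm_num)]
                symm; rw [decide_eq_true_iff]
                simp only [pvBonus]
                split_ifs <;> (try contradiction) <;> push_cast <;> omega
            · have hu' : u = true := by revert hu; cases u <;> simp
              subst hu'
              rw [if_neg (by rintro ⟨-, -, hh⟩; exact absurd hh (by simp))]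
              rcases hp with hp | hp
              · subst hp
                rw [if_neg (by norm_num), show (0:Int) + 1 = 1 from by norm_num,
                    ih hlr 1 w true (Or.inr rfl) hw, decide_eq_decide]
                simp only [pvBonus]
                split_ifs <;> (try contradiction) <;> push_cast <;> omega
              · subst hp
                rw [if_pos (by norm_num)]
                symm; rw [decide_eq_true_iff]
                simp only [pvBonus]
                split_ifs <;> (try contradiction) <;> push_cast <;> omega
          · -- no wildcard available: card skipped
            have hw0 : w = 0 := by omega
            subst hw0
            have hA : ¬ ((hand.count c : Int) + 0 ≥ 2) := by omega
            have hB : ¬ p = 2 := by omega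
            rw [if_neg hA, if_neg hB, ih hlr p 0 u hp le_rfl, decide_eq_decide]
            simp only [pvBonus]
            split_ifs <;> (try contradiction) <;> push_cast <;> omega

-- B's n1/n2 sums over the counter's items are countP over the distinct cards
lemma alt_eq (hand : String) :
    is_two_pairs_alt hand =
      decide (2 ≤ (pvN2 hand.toList (PySem.Set.ofList hand.toList) : Int) +
        pvBonus (pvN1 hand.toList (PySem.Set.ofList hand.toList))
          (hand.toList.count 'J' : Int) false) := by
  unfold is_two_pairs_alt
  simp only [PySem.Dict.foldl_insert_getD_add_one_eq_counter, PySem.Dict.getD_counter,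
             PySem.Dict.items_counter, List.map_map]
  have e1 : List.map ((fun p : Char × Int => if p.1 ≠ 'J' ∧ p.2 = 1 then (1 : Int) else 0) ∘
        (fun k => (k, (hand.toList.count k : Int)))) (PySem.Set.ofList hand.toList)
      = List.map (fun k => if (fun c => decide (c ≠ 'J' ∧ hand.toList.count c = 1)) k = true
          then (1 : Int) else 0) (PySem.Set.ofList hand.toList) := by
    apply List.map_congr_left
    intro k _
    simp only [Function.comp_apply, decide_eq_true_eq]
    refine if_congr (and_congr_right fun _ => ?_) rfl rfl
    exact ⟨fun h => by exact_mod_cast h, fun h => by exact_mod_cast h⟩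
  have e2 : List.map ((fun p : Char × Int => if p.1 ≠ 'J' ∧ p.2 ≥ 2 then (1 : Int) else 0) ∘
        (fun k => (k, (hand.toList.count k : Int)))) (PySem.Set.ofList hand.toList)
      = List.map (fun k => if (fun c => decide (c ≠ 'J' ∧ 2 ≤ hand.toList.count c)) k = true
          then (1 : Int) else 0) (PySem.Set.ofList hand.toList) := by
    apply List.map_congr_left
    intro k _
    simp only [Function.comp_apply, decide_eq_true_eq, ge_iff_le]
    refine if_congr (and_congr_right fun _ => ?_) rfl rfl
    exact ⟨fun h => by exact_mod_cast h, fun h => by exact_mod_cast h⟩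
  rw [e1, e2, PySem.List.sum_map_ite_one_zero, PySem.List.sum_map_ite_one_zero,
      decide_eq_decide]
  unfold pvN1 pvN2 pvBonus
  split_ifs <;> (try contradiction) <;> push_cast <;> omega

-- ===== VERDICT (by name: the statement is the Claim_ definition above) =====
theorem is_two_pairs_spec : Claim_equal_is_two_pairs := by
  intro hand _
  unfold Spec_is_two_pairs is_two_pairs
  rw [alt_eq]
  rw [loopA_eq hand.toList (PySem.Set.ofList hand.toList)
      (fun c hc _ => List.count_pos_iff.mpr ((PySem.Set.mem_ofList _ _).mp hc))
      0 (hand.toList.count 'J' : Int) false (Or.inl rfl) (by positivity)]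
  norm_num
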